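-- pv_equiv track=rewrite | github.com/imaik129/Spotify-Mood-Box | retrieve-spotify-data.py | find_most_recurring_val
-- ===== SOURCE A (Python) =====
-- def find_most_recurring_val(list):
--     count_map = {}
--     for item in list:
--         if item not in count_map:
--             count_map[item] = 1
--         else:
--             count_map[item] += 1
--     map_vals = count_map.values()
--     return max(map_vals)
-- ===== SOURCE B (Python) =====
-- def find_most_recurring_val(list):
--     best = 0
--     run = 0
--     prev = None
--     for x in sorted(list):
--         if prev == x:
--             run += 1
--         else:
--             run = 1
--             prev = x
--         if run > best:
--             best = run
--     return best
-- ===== Notes on version B (the rewrite author's own statement) =====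
-- stated objective: alternative
-- what changed: Replaces the hash-map counting pass (dict of counts, then max over the values) by sort-then-scan: sort the list and track the longest run of equal adjacent elements in one pass, no dictionary at all.
import Mathlib
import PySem

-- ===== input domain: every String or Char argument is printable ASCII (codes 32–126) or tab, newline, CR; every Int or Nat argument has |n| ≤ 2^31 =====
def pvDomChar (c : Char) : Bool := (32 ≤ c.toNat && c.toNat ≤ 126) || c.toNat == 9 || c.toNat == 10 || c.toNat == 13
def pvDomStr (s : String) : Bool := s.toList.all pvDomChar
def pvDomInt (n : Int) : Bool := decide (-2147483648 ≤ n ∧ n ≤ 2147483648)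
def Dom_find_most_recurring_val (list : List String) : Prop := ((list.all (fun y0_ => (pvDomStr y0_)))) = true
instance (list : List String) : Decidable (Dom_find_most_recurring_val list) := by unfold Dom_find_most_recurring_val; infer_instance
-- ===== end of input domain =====

-- B replaces A's dict-of-counts + max-over-values by sort-then-scan (longest run of equal
-- adjacent elements in the sorted list); an alternative algorithm, not claimed faster.


-- ===== PORT A =====
def find_most_recurring_val (list : List String) : Int :=
  let count_map := list.foldl
    (fun d item =>
      if d.contains item = false then d.insert item 1
      else d.insert item (d.getD item 0 + 1))      -- count_map[item] += 1
    PySem.Dict.empty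
  let map_vals := count_map.values
  match PySem.List.max? map_vals (fun y => y) with
  | some v => v
  | none => 0   -- unreachable under Pre_: Python's max raises ValueError on an empty sequence

-- ===== PORT B =====
-- the for-loop of Source B over sorted(list), state (prev, run, best)
def pvRunLoop : List String → Option String → Int → Int → Int
  | [], _, _, best => best
  | x :: rest, prev, run, best =>
    if prev = some x then
      pvRunLoop rest prev (run + 1) (if run + 1 > best then run + 1 else best)
    else
      pvRunLoop rest (some x) 1 (if 1 > best then 1 else best)

def find_most_recurring_val_alt (list : List String) : Int :=
  pvRunLoop (PySem.List.sorted list (fun x => x) false) none 0 0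

-- ===== PRECONDITION & SPEC =====
-- Pre_ excludes only the empty list, on which A's max() raises ValueError.
def Pre_find_most_recurring_val (list : List String) : Prop := list ≠ []
instance (list : List String) : Decidable (Pre_find_most_recurring_val list) := by unfold Pre_find_most_recurring_val; infer_instance
def pvWitness_find_most_recurring_val : List String := (["a", "b", "a"])

def Spec_find_most_recurring_val (list : List String) (out : Int) : Prop := out = find_most_recurring_val_alt list
instance (list : List String) (out : Int) : Decidable (Spec_find_most_recurring_val list out) := by unfold Spec_find_most_recurring_val; infer_instance

-- ===== CLAIM (what is proved, stated in full; the proofs are below) =====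
def Claim_equal_find_most_recurring_val : Prop := ∀ (list : List String), Dom_find_most_recurring_val list → Pre_find_most_recurring_val list → Spec_find_most_recurring_val list (find_most_recurring_val list)

-- ===== LEMMAS AND PROOFS =====

-- proof-only spec: the highest multiplicity in a list (any list; 0 for []); fuel = length
def maxCntF : Nat → List String → Int
  | _, [] => 0
  | 0, _ :: _ => 0
  | n + 1, x :: rest =>
      max (1 + (rest.count x : Int)) (maxCntF n (rest.filter (fun y => !(y == x))))

def maxCnt (l : List String) : Int := maxCntF l.length l

lemma maxCntF_congr : ∀ (n m : Nat) (l : List String), l.length ≤ n → l.length ≤ m →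
    maxCntF n l = maxCntF m l := by
  intro n
  induction n with
  | zero =>
    intro m l hn _
    have : l = [] := List.eq_nil_of_length_eq_zero (Nat.le_zero.mp hn)
    subst this
    cases m <;> rfl
  | succ n ih =>
    intro m l hn hm
    cases l with
    | nil => cases m <;> rfl
    | cons x rest =>
      cases m with
      | zero => simp at hm
      | succ m =>
        simp only [maxCntF]
        congr 1
        exact ih m _ (le_trans (List.length_filter_le _ _) (by simpa using hn))
          (le_trans (List.length_filter_le _ _) (by simpa using hm))

lemma maxCnt_nil : maxCnt [] = 0 := rfl

lemma maxCnt_cons (x : String) (rest : List String) :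
    maxCnt (x :: rest)
      = max (1 + (rest.count x : Int)) (maxCnt (rest.filter (fun y => !(y == x)))) := by
  unfold maxCnt
  simp only [List.length_cons, maxCntF]
  congr 1
  exact maxCntF_congr _ _ _ (List.length_filter_le _ _) le_rfl

lemma maxCnt_is_max_aux : ∀ (n : Nat) (s : List String), s.length ≤ n →
    ∀ y ∈ s, (s.count y : Int) ≤ maxCnt s := by
  intro n
  induction n with
  | zero =>
    intro s hs y hy
    have : s = [] := List.eq_nil_of_length_eq_zero (Nat.le_zero.mp hs)
    subst this; simp at hy
  | succ n ih =>
    intro s hs y hy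
    cases s with
    | nil => simp at hy
    | cons x rest =>
      rw [maxCnt_cons]
      by_cases hyx : y = x
      · subst hyx
        rw [List.count_cons_self]
        push_cast; omega
      · have hyrest : y ∈ rest := by
          rcases List.mem_cons.mp hy with h | h
          · exact absurd h hyx
          · exact h
        have h1 : (x :: rest).count y = rest.count y := by
          simp [List.count_cons]
          exact fun h => hyx h.symm
        rw [h1]
        have h2 : (rest.filter (fun z => !(z == x))).count y = rest.count y := by
          rw [List.count_filter]
          simp [hyx]
        have hmem : y ∈ rest.filter (fun z => !(z == x)) := by
          rw [List.mem_filter]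
          exact ⟨hyrest, by simpa using hyx⟩
        have := ih (rest.filter (fun z => !(z == x)))
          (le_trans (List.length_filter_le _ _) (by simpa using hs)) y hmem
        rw [h2] at this
        omega

lemma maxCnt_is_max (s : List String) : ∀ y ∈ s, (s.count y : Int) ≤ maxCnt s :=
  maxCnt_is_max_aux s.length s le_rfl

lemma maxCnt_attained_aux : ∀ (n : Nat) (s : List String), s.length ≤ n → s ≠ [] →
    ∃ y ∈ s, maxCnt s = (s.count y : Int) := by
  intro n
  induction n with
  | zero =>
    intro s hs hne
    exact absurd (List.eq_nil_of_length_eq_zero (Nat.le_zero.mp hs)) hne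
  | succ n ih =>
    intro s hs _
    cases s with
    | nil => exact absurd rfl ‹([] : List String) ≠ []›
    | cons x rest =>
      by_cases hc : maxCnt (rest.filter (fun y => !(y == x))) ≤ 1 + (rest.count x : Int)
      · refine ⟨x, List.mem_cons_self, ?_⟩
        rw [maxCnt_cons, List.count_cons_self]
        push_cast; omega
      · push_neg at hc
        have hfne : rest.filter (fun y => !(y == x)) ≠ [] := by
          intro hnil
          rw [hnil, maxCnt_nil] at hc
          have : (0 : Int) ≤ (rest.count x : Int) := Int.natCast_nonneg _
          omega
        obtain ⟨y, hymem, hyeq⟩ := ih (rest.filter (fun y => !(y == x)))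
          (le_trans (List.length_filter_le _ _) (by simpa using hs)) hfne
        have hyx : y ≠ x := by simpa using (List.mem_filter.mp hymem).2
        have hyrest : y ∈ rest := (List.mem_filter.mp hymem).1
        refine ⟨y, List.mem_cons_of_mem _ hyrest, ?_⟩
        have h1x : (x :: rest).count y = rest.count y := by
          simp [List.count_cons]
          exact fun h => hyx h.symm
        rw [maxCnt_cons, h1x]
        have h2 : (rest.filter (fun z => !(z == x))).count y = rest.count y := by
          rw [List.count_filter]
          simp [hyx]
        rw [h2] at hyeq
        omega

lemma maxCnt_attained (s : List String) (h : s ≠ []) :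
    ∃ y ∈ s, maxCnt s = (s.count y : Int) :=
  maxCnt_attained_aux s.length s le_rfl h

-- the run-scan loop on a sorted tail, with prev = some p and an active run of length r
lemma pvRunLoop_spec : ∀ (s : List String), s.Pairwise (· ≤ ·) →
    ∀ (p : String) (r b : Int), (∀ x ∈ s, p ≤ x) → 1 ≤ r → r ≤ b →
    pvRunLoop s (some p) r b
      = max b (max (r + (s.count p : Int)) (maxCnt (s.filter (fun y => !(y == p))))) := by
  intro s
  induction s with
  | nil =>
    intro _ p r b _ h1 hrb
    simp [pvRunLoop, maxCnt_nil]
    omega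
  | cons x rest ih =>
    intro hs p r b hp h1 hrb
    have hs' : rest.Pairwise (· ≤ ·) := hs.of_cons
    have hx_le : ∀ y ∈ rest, x ≤ y := fun y hy => List.rel_of_pairwise_cons hs hy
    by_cases hxp : p = x
    · subst hxp
      rw [pvRunLoop]
      rw [if_pos rfl]
      have hcnt : (p :: rest).count p = rest.count p + 1 := by simp
      have hfil : (p :: rest).filter (fun y => !(y == p)) = rest.filter (fun y => !(y == p)) := by
        simp
      rw [ih hs' p (r + 1) (if r + 1 > b then r + 1 else b)
            (fun y hy => hp y (List.mem_cons_of_mem _ hy)) (by omega) (by split_ifs <;> omega),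
          hcnt, hfil]
      push_cast
      split_ifs <;> omega
    · rw [pvRunLoop]
      have hne : ¬ (some p = some x) := by simpa using hxp
      rw [if_neg hne]
      have hif : (if (1 : Int) > b then (1 : Int) else b) = b := by omega
      rw [hif]
      have hplt : ∀ y ∈ x :: rest, p < y := by
        intro y hy
        have hpx : p < x := lt_of_le_of_ne (hp x List.mem_cons_self) hxp
        rcases List.mem_cons.mp hy with h | h
        · subst h; exact hpx
        · exact lt_of_lt_of_le hpx (hx_le y h)
      have hcnt0 : (x :: rest).count p = 0 := by
        rw [List.count_eq_zero]
        intro hmem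
        exact absurd rfl (ne_of_gt (hplt p hmem))
      have hfil : (x :: rest).filter (fun y => !(y == p)) = x :: rest := by
        apply List.filter_eq_self.mpr
        intro y hy
        simpa using (ne_of_gt (hplt y hy))
      rw [ih hs' x 1 b hx_le (by omega) (by omega), hcnt0, hfil]
      rw [maxCnt_cons]
      omega

lemma B_eq_maxCnt_sorted (l : List String) (h : l ≠ []) :
    find_most_recurring_val_alt l = maxCnt (PySem.List.sorted l (fun x => x) false) := by
  have hsne : PySem.List.sorted l (fun x => x) false ≠ [] := by
    intro hnil
    exact h ((PySem.List.sorted_eq_nil_iff _ _ _).mp hnil)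
  have hpw : (PySem.List.sorted l (fun x => x) false).Pairwise (· ≤ ·) := by
    simpa using PySem.List.sorted_pairwise l (fun x => x)
  rcases hs : PySem.List.sorted l (fun x => x) false with _ | ⟨x, rest⟩
  · exact absurd hs hsne
  · rw [hs] at hpw
    unfold find_most_recurring_val_alt
    rw [hs, pvRunLoop]
    have hne : ¬ ((none : Option String) = some x) := by simp
    rw [if_neg hne]
    have hif : (if (1 : Int) > 0 then (1 : Int) else 0) = 1 := by omega
    rw [hif]
    rw [pvRunLoop_spec rest hpw.of_cons x 1 1 (fun y hy => List.rel_of_pairwise_cons hpw hy) le_rfl le_rfl]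
    rw [maxCnt_cons]
    have : (0 : Int) ≤ (rest.count x : Int) := Int.natCast_nonneg _
    omega

lemma step_eq (d : PySem.Dict String Int) (x : String) :
    (if d.contains x = false then d.insert x 1 else d.insert x (d.getD x 0 + 1))
      = d.insert x (d.getD x 0 + 1) := by
  by_cases h : d.contains x = false
  · have hget : d.getD x 0 = 0 := by
      have : d.get? x = none := (PySem.Dict.get?_eq_none_iff_contains d x).mpr h
      simp [PySem.Dict.getD, this]
    rw [if_pos h, hget]
    norm_num
  · rw [if_neg h]

lemma A_vals (l : List String) :
    (l.foldl
      (fun d item =>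
        if d.contains item = false then d.insert item 1
        else d.insert item (d.getD item 0 + 1))
      PySem.Dict.empty).values
      = (PySem.List.dedup l).map (fun x => (l.count x : Int)) := by
  have hfun : (fun (d : PySem.Dict String Int) item =>
      if d.contains item = false then d.insert item 1
      else d.insert item (d.getD item 0 + 1))
      = (fun d item => d.insert item (d.getD item 0 + 1)) := by
    funext d item; exact step_eq d item
  rw [hfun, PySem.Dict.foldl_insert_getD_add_one_eq_counter]
  have : (PySem.Dict.counter l).values = (PySem.Dict.counter l).items.map (·.2) := rfl
  rw [this, PySem.Dict.items_counter]
  simp [List.map_map, Function.comp_def]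

lemma A_eq_maxCnt_sorted (l : List String) (h : l ≠ []) :
    find_most_recurring_val l = maxCnt (PySem.List.sorted l (fun x => x) false) := by
  have hperm : (PySem.List.sorted l (fun x => x) false).Perm l := PySem.List.sorted_perm l _ _
  have hvalsne : (PySem.List.dedup l).map (fun x => (l.count x : Int)) ≠ [] := by
    rcases l with _ | ⟨a, t⟩
    · exact absurd rfl h
    · have : a ∈ PySem.List.dedup (a :: t) := (PySem.List.mem_dedup _ _).mpr List.mem_cons_self
      exact fun hnil => by
        have := List.ne_nil_of_mem (List.mem_map_of_mem (f := fun x => ((a :: t).count x : Int)) this)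
        exact this hnil
  obtain ⟨v, hv⟩ : ∃ v, PySem.List.max? ((PySem.List.dedup l).map (fun x => (l.count x : Int))) (fun y => y) = some v := by
    rcases ho : PySem.List.max? ((PySem.List.dedup l).map (fun x => (l.count x : Int))) (fun y => y) with _ | v
    · exact absurd ((PySem.List.max?_eq_none_iff _ _).mp ho) hvalsne
    · exact ⟨v, rfl⟩
  have hA : find_most_recurring_val l = v := by
    unfold find_most_recurring_val
    simp only [A_vals l, hv]
  rw [hA]
  -- v = count of some element; v is an upper bound of all counts
  have hvmem := PySem.List.max?_mem hv
  obtain ⟨x, hxdedup, hxv⟩ := List.mem_map.mp hvmem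
  have hxl : x ∈ l := (PySem.List.mem_dedup _ _).mp hxdedup
  have hxs : x ∈ PySem.List.sorted l (fun x => x) false := hperm.mem_iff.mpr hxl
  have hle1 : v ≤ maxCnt (PySem.List.sorted l (fun x => x) false) := by
    rw [← hxv]
    rw [show l.count x = (PySem.List.sorted l (fun x => x) false).count x from (hperm.count_eq x).symm]
    exact maxCnt_is_max _ x hxs
  have hle2 : maxCnt (PySem.List.sorted l (fun x => x) false) ≤ v := by
    have hsne : PySem.List.sorted l (fun x => x) false ≠ [] := by
      intro hnil; exact h ((PySem.List.sorted_eq_nil_iff _ _ _).mp hnil)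
    obtain ⟨y, hymem, hyeq⟩ := maxCnt_attained _ hsne
    have hyl : y ∈ l := hperm.mem_iff.mp hymem
    have hycnt : (PySem.List.sorted l (fun x => x) false).count y = l.count y := hperm.count_eq y
    have hymapmem : (l.count y : Int) ∈ (PySem.List.dedup l).map (fun x => (l.count x : Int)) :=
      List.mem_map_of_mem ((PySem.List.mem_dedup _ _).mpr hyl)
    have := PySem.List.max?_isMax hv _ hymapmem
    rw [hyeq, hycnt]
    simpa using this
  omega

-- ===== VERDICT (by name: the statement is the Claim_ definition above) =====
theorem find_most_recurring_val_spec : Claim_equal_find_most_recurring_val := by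
  intro l _ hpre
  unfold Spec_find_most_recurring_val
  rw [A_eq_maxCnt_sorted l hpre, B_eq_maxCnt_sorted l hpre]
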